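-- pv_equiv track=rewrite | github.com/haasonsaas/jarvis | src/jarvis/runtime_turn.py | completion_success_from_summaries
-- ===== SOURCE A (Python) =====
-- from typing import Any, Callable, Mapping
--
-- def completion_success_from_summaries(summaries: list[dict[str, Any]]) -> bool | None:
--     if not summaries:
--         return None
--     success_statuses = {"ok", "dry_run", "noop", "cooldown"}
--     failure_statuses = {"error", "denied"}
--     has_success = any(str(item.get("status", "")).strip().lower() in success_statuses for item in summaries)
--     has_failure = any(str(item.get("status", "")).strip().lower() in failure_statuses for item in summaries)
--     if has_success:
--         return True
--     if has_failure:
--         return False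
--     return None
-- ===== SOURCE B (Python) =====
-- def completion_success_from_summaries(summaries: list[dict[str, object]]) -> bool | None:
--     if not summaries:
--         return None
--     has_failure = False
--     for item in summaries:
--         status = str(item.get("status", "")).strip().lower()
--         if status in ("ok", "dry_run", "noop", "cooldown"):
--             return True
--         if status in ("error", "denied"):
--             has_failure = True
--     return False if has_failure else None
-- ===== Notes on version B (the rewrite author's own statement) =====
-- stated objective: simpler
-- what changed: Replaced the two any()-scans (each normalizing every status) with one pass that returns True immediately on the first success status and tracks a has_failure flag, normalizing each status exactly once.
import Mathlib
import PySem

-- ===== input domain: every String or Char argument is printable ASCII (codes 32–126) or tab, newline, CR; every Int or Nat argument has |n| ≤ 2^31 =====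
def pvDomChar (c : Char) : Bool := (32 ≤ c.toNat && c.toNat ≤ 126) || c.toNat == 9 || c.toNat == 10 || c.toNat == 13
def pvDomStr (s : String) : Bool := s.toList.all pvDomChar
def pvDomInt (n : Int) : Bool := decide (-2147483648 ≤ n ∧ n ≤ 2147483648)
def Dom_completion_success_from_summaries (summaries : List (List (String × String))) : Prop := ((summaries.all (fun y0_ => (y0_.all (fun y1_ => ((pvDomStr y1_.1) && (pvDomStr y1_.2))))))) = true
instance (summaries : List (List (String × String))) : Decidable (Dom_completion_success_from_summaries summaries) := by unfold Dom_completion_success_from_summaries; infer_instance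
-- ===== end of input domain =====

-- B replaces A's two any()-scans by a single early-exit loop with a has_failure flag (objective: simpler).

-- shared normalization: str(item.get("status", "")).strip().lower()
def pvNormStatus (item : List (String × String)) : String :=
  PySem.Str.lower (PySem.Str.strip ((PySem.Dict.mk item).getD "status" ""))

def pvSuccessStatuses : List String := ["ok", "dry_run", "noop", "cooldown"]
def pvFailureStatuses : List String := ["error", "denied"]

-- ===== PORT A =====
def completion_success_from_summaries (summaries : List (List (String × String))) : Option Bool :=
  if summaries = [] then none
  else
    let has_success := summaries.any (fun item => pvSuccessStatuses.contains (pvNormStatus item))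
    let has_failure := summaries.any (fun item => pvFailureStatuses.contains (pvNormStatus item))
    if has_success then some true
    else if has_failure then some false
    else none

-- ===== PORT B =====
def pvLoopB : List (List (String × String)) → Bool → Option Bool
  | [], has_failure => if has_failure then some false else none
  | item :: rest, has_failure =>
      if pvSuccessStatuses.contains (pvNormStatus item) then some true
      else pvLoopB rest (has_failure || pvFailureStatuses.contains (pvNormStatus item))

def completion_success_from_summaries_alt (summaries : List (List (String × String))) : Option Bool :=
  if summaries = [] then none
  else pvLoopB summaries false

-- ===== PRECONDITION & SPEC =====
def Spec_completion_success_from_summaries (summaries : List (List (String × String))) (out : Option Bool) : Prop := out = completion_success_from_summaries_alt summaries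
instance (summaries : List (List (String × String))) (out : Option Bool) : Decidable (Spec_completion_success_from_summaries summaries out) := by unfold Spec_completion_success_from_summaries; infer_instance

-- ===== CLAIM (what is proved, stated in full; the proofs are below) =====
def Claim_equal_completion_success_from_summaries : Prop := ∀ (summaries : List (List (String × String))), Dom_completion_success_from_summaries summaries → Spec_completion_success_from_summaries summaries (completion_success_from_summaries summaries)

-- ===== LEMMAS AND PROOFS =====
theorem pvLoopB_char (xs : List (List (String × String))) (hf : Bool) :
    pvLoopB xs hf =
      if xs.any (fun item => pvSuccessStatuses.contains (pvNormStatus item)) then some true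
      else if hf || xs.any (fun item => pvFailureStatuses.contains (pvNormStatus item)) then some false
      else none := by
  induction xs generalizing hf with
  | nil => simp [pvLoopB]
  | cons item rest ih =>
      by_cases hs : pvNormStatus item ∈ pvSuccessStatuses
      · simp [pvLoopB, hs]
      · by_cases hfi : pvNormStatus item ∈ pvFailureStatuses <;>
          simp [pvLoopB, hs, hfi, ih]

-- ===== VERDICT (by name: the statement is the Claim_ definition above) =====
theorem completion_success_from_summaries_spec : Claim_equal_completion_success_from_summaries := by
  intro summaries _
  unfold Spec_completion_success_from_summaries completion_success_from_summaries completion_success_from_summaries_alt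
  by_cases h : summaries = []
  · simp [h]
  · simp only [h, if_false, pvLoopB_char, Bool.false_or]
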